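-- pv_equiv track=rewrite | github.com/Minoo7/TDDE24 | tenta/2021_08_17/solutions_210817.py | facit_find_variants
-- ===== SOURCE A (Python) =====
-- def facit_find_variants(numbers: list[int]):
--     # There are at least two numbers in the original input.  Recursive calls
--     # only remove one number at a time, and recursion is terminated when only
--     # one number remains.  Therefore we should never get an empty list.
--     assert len(numbers) > 0
--
--     if len(numbers) == 1:
--         # Recursive base case:  There is only one number "left", so the only variant
--         # uses *no* operators.  Its result is the first (only) number.
--         only_variant = ([], numbers[0])
--         return [only_variant]
--
--     # OK, we have at least two numbers.
--     # Now we need to recurse, but in what sub-problem?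
--     # The task states:
--     #
--     # När vi skriver 1+2-3+4-5 menar vi ((((1+2)-3)+4)-5),
--     # så vi börjar med att räkna ut 1+2 och subtraherar sedan 3,
--     # precis som när man skriver in ett tal i en gammaldags
--     # miniräknare.
--     #
--     # This means that we have to handle (((1+2)-3)+4) first,
--     # and *then* deal with the 5.  In other words, given the
--     # list [1,2,3,4,5], we recurse on [1,2,3,4], and when we
--     # get the result, we have to deal with the 5.  This means
--     # recursing on numbers[:-1].
--
--     result = []
--     sub_variants = facit_find_variants(numbers[:-1])
--
--     # Now sub_variants contains all the variants of
--     # [1,2,3,4] in the example.  For example, (['+','+','+'],10) and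
--     # (['-','-','-'],-8) would be in the sub_variants list.
--
--     # Each such variant has to be expanded to 3 new variants: One
--     # where we add 5, one where we subtract 5, and one where we
--     # multiply by 5.
--
--     for variant in sub_variants:
--         operations, subresult = variant
--
--         # The old operations plus the new operation;
--         # the old result modified with the new number
--         mod1 = (operations + ["+"], subresult + numbers[-1])
--         result.append(mod1)
--
--         mod2 = (operations + ["-"], subresult - numbers[-1])
--         result.append(mod2)
--
--         mod3 = (operations + ["*"], subresult * numbers[-1])
--         result.append(mod3)
--
--     # Now len(result) == 3*len(sub_variants), and we return all the
--     # variants.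
--     return result
-- ===== SOURCE B (Python) =====
-- def facit_find_variants(numbers: list[int]):
--     assert len(numbers) > 0
--     variants = [([], numbers[0])]
--     for n in numbers[1:]:
--         variants = [(ops + [op], r)
--                     for ops, res in variants
--                     for op, r in (("+", res + n), ("-", res - n), ("*", res * n))]
--     return variants
-- ===== Notes on version B (the rewrite author's own statement) =====
-- stated objective: alternative
-- what changed: Replaces the recursion on numbers[:-1] plus an append loop with a single forward loop over numbers[1:] that rebuilds the variant frontier by a flat comprehension.
-- outside the precondition, e.g. on facit_find_variants([]): A raises AssertionError, B raises AssertionError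
import Mathlib
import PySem

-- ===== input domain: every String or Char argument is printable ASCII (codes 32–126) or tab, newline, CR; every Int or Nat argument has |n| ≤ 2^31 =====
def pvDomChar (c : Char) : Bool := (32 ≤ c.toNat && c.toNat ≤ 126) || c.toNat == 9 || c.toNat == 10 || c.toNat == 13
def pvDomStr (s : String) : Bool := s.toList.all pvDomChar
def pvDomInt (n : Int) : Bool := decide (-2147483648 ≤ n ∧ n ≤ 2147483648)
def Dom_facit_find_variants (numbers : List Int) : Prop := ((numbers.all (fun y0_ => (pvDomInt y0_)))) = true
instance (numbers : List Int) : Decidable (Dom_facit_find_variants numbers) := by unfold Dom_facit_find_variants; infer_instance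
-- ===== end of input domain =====

-- B replaces A's right-recursion on numbers[:-1] with one forward loop maintaining the
-- frontier of variants (same results; objective: alternative decomposition).
-- Both programs assert len(numbers) > 0: Pre_ excludes the empty list (AssertionError).

-- ===== PORT A =====
-- A recurses on numbers[:-1] (dropLast) and expands each sub-variant with +, -, * of numbers[-1].
def facit_find_variants (numbers : List Int) : List (List String × Int) :=
  if numbers.length = 0 then []   -- Python: assert fails; excluded by Pre_
  else if numbers.length = 1 then [(([] : List String), numbers.headI)]
  else
    let last := numbers.getLastD 0
    (facit_find_variants numbers.dropLast).foldl
      (fun result v =>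
        result ++ [(v.1 ++ ["+"], v.2 + last)]
               ++ [(v.1 ++ ["-"], v.2 - last)]
               ++ [(v.1 ++ ["*"], v.2 * last)]) []
termination_by numbers.length
decreasing_by
  simp [List.length_dropLast]; omega

-- ===== PORT B =====
def pvExpand (x : Int) (v : List String × Int) : List (List String × Int) :=
  [(v.1 ++ ["+"], v.2 + x), (v.1 ++ ["-"], v.2 - x), (v.1 ++ ["*"], v.2 * x)]

def facit_find_variants_alt (numbers : List Int) : List (List String × Int) :=
  match numbers with
  | [] => []                      -- Python: assert fails; excluded by Pre_
  | n :: rest =>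
    rest.foldl (fun variants x => variants.flatMap (pvExpand x)) [(([] : List String), n)]

-- ===== PRECONDITION & SPEC =====
-- Pre_ excludes exactly the empty list, on which both Pythons raise AssertionError.
def Pre_facit_find_variants (numbers : List Int) : Prop := numbers ≠ []
instance (numbers : List Int) : Decidable (Pre_facit_find_variants numbers) := by unfold Pre_facit_find_variants; infer_instance
def pvWitness_facit_find_variants : List Int := [1, 2, 3]
def Spec_facit_find_variants (numbers : List Int) (out : List (List String × Int)) : Prop := out = facit_find_variants_alt numbers
instance (numbers : List Int) (out : List (List String × Int)) : Decidable (Spec_facit_find_variants numbers out) := by unfold Spec_facit_find_variants; infer_instance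

-- ===== CLAIM (what is proved, stated in full; the proofs are below) =====
def Claim_equal_facit_find_variants : Prop := ∀ (numbers : List Int), Dom_facit_find_variants numbers → Pre_facit_find_variants numbers → Spec_facit_find_variants numbers (facit_find_variants numbers)

-- ===== LEMMAS AND PROOFS =====

theorem alt_append_last (n : Int) (rest : List Int) (x : Int) :
    facit_find_variants_alt (n :: (rest ++ [x]))
      = (facit_find_variants_alt (n :: rest)).flatMap (pvExpand x) := by
  simp [facit_find_variants_alt, List.foldl_append]

theorem foldl_expand (x : Int) (vs : List (List String × Int)) (acc : List (List String × Int)) :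
    List.foldl (fun result v =>
        result ++ [(v.1 ++ ["+"], v.2 + x)]
               ++ [(v.1 ++ ["-"], v.2 - x)]
               ++ [(v.1 ++ ["*"], v.2 * x)]) acc vs = acc ++ vs.flatMap (pvExpand x) := by
  induction vs generalizing acc with
  | nil => simp
  | cons v vs ih => rw [List.foldl_cons, ih]; simp [pvExpand, List.flatMap_cons]

theorem a_eq_alt (n : Int) (rest : List Int) :
    facit_find_variants (n :: rest) = facit_find_variants_alt (n :: rest) := by
  induction rest using List.reverseRecOn with
  | nil => simp [facit_find_variants, facit_find_variants_alt]
  | append_singleton r x ih =>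
    rw [alt_append_last, ← ih]
    rw [facit_find_variants]
    have hlen : (n :: (r ++ [x])).length ≠ 0 := by simp
    have hlen1 : (n :: (r ++ [x])).length ≠ 1 := by simp
    simp only [hlen, hlen1, if_false]
    have hd : (n :: (r ++ [x])).dropLast = n :: r := by
      simpa using (List.dropLast_concat (l₁ := n :: r) (b := x))
    have hl : (n :: (r ++ [x])).getLastD 0 = x := by
      rw [List.getLastD_eq_getLast?, show n :: (r ++ [x]) = (n :: r) ++ [x] by simp,
          List.getLast?_concat]
      rfl
    rw [hd, hl, foldl_expand]
    simp

-- ===== VERDICT (by name: the statement is the Claim_ definition above) =====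
theorem facit_find_variants_spec : Claim_equal_facit_find_variants := by
  intro numbers _ hpre
  unfold Spec_facit_find_variants
  match numbers with
  | [] => exact absurd rfl hpre
  | n :: rest => exact a_eq_alt n rest
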